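-- pv_equiv track=rewrite | github.com/981377660LMT/algorithm-study | 11_动态规划/351. 安卓系统手势解锁状压dp.py | numberOfPatterns
-- ===== SOURCE A (Python) =====
-- def numberOfPatterns(m: int, n: int) -> int:
--     # 跳过了中点
--     def isInvalidTransfer(visited: int, cur: int, next: int):
--         x1, y1 = divmod(cur, 3)
--         x2, y2 = divmod(next, 3)
--         mid = ((x1 + x2) // 2) * 3 + (y1 + y2) // 2
--         return ((x1 + x2) & 1 == 0) and ((y1 + y2) & 1 == 0) and (visited & (1 << mid)) == 0
--
--     # dp[state][i] 代表访问过的点集合是 state 且最后一个点是 i 的有效序列数量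
--     dp = [[0] * 9 for _ in range(1 << 9)]
--     for i in range(9):
--         dp[1 << i][i] = 1
--     for state in range(1 << 9):
--         for pre in range(9):
--             for cur in range(9):
--                 if state & (1 << cur) or isInvalidTransfer(state, pre, cur):
--                     continue
--                 dp[state | (1 << cur)][cur] += dp[state][pre]
--     return sum(sum(dp[state]) for state in range(1 << 9) if m <= bin(state).count('1') <= n)
-- ===== SOURCE B (Python) =====
-- def numberOfPatterns(m: int, n: int) -> int:
--     # Recursive DFS backtracking over the 9 cells instead of a 512x9 DP table;
--     # counts a path the moment its length lies in [m, n].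
--     def crosses(visited: int, a: int, b: int) -> bool:
--         xa, ya = divmod(a, 3)
--         xb, yb = divmod(b, 3)
--         if (xa + xb) % 2 != 0 or (ya + yb) % 2 != 0:
--             return False
--         mid = (xa + xb) // 2 * 3 + (ya + yb) // 2
--         return (visited >> mid) & 1 == 0
--
--     def dfs(cur: int, visited: int, depth: int) -> int:
--         cnt = 1 if m <= depth <= n else 0
--         for nxt in range(9):
--             if (visited >> nxt) & 1 or crosses(visited, cur, nxt):
--                 continue
--             cnt += dfs(nxt, visited | (1 << nxt), depth + 1)
--         return cnt
--
--     return sum(dfs(s, 1 << s, 1) for s in range(9))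
-- ===== Notes on version B (the rewrite author's own statement) =====
-- stated objective: simpler
-- what changed: Replaced the bottom-up 512x9 bitmask DP table with a direct recursive DFS backtracking over the 9 cells that increments the total whenever the current path length lies in [m, n].
import Mathlib
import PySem

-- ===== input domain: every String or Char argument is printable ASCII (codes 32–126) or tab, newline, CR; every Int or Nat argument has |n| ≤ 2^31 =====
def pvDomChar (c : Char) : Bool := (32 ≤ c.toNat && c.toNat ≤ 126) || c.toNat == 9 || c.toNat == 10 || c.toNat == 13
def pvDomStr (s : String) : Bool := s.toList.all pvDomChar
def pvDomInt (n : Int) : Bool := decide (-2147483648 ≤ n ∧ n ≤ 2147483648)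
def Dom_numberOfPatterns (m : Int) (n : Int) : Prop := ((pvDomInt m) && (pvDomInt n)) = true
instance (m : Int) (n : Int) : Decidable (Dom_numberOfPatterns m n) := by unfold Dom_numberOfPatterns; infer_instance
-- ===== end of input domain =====

-- B replaces A's bottom-up 512x9 bitmask DP table by a recursive DFS backtracking
-- over the 9 cells (counting a path as soon as its length lies in [m, n]); same values, simpler code.


set_option maxRecDepth 20000

-- ===== PORT A =====
-- `isInvalidTransfer` of A; all arguments are nonnegative Python ints, so Nat `/ % &&& <<<` are exact.
def pvBad (visited cur nxt : Nat) : Bool :=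
  let x1 := cur / 3
  let y1 := cur % 3
  let x2 := nxt / 3
  let y2 := nxt % 3
  let mid := ((x1 + x2) / 2) * 3 + (y1 + y2) / 2
  ((x1 + x2) &&& 1 == 0) && ((y1 + y2) &&& 1 == 0) && (visited &&& (1 <<< mid) == 0)

-- `dp[s][i] = v` (every use has s < 512 and i < 9, so the getD defaults are never taken)
def pvSet2 (dp : List (List Int)) (s i : Nat) (v : Int) : List (List Int) :=
  dp.set s ((dp.getD s []).set i v)

-- `bin(state).count('1')`: for the arguments it receives (state < 2^9) this equals
-- the population count of the 9 low bits computed here.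
def pvPop (s : Nat) : Nat := (List.range 9).foldl (fun a i => a + ((s >>> i) &&& 1)) 0

def numberOfPatterns (m : Int) (n : Int) : Int :=
  let dp0 := (List.range 9).foldl (fun dp i => pvSet2 dp (1 <<< i) i 1)
      (List.replicate 512 (List.replicate 9 (0 : Int)))
  let dp := (List.range 512).foldl (fun dp state =>
    (List.range 9).foldl (fun dp pre =>
      (List.range 9).foldl (fun dp cur =>
        if state &&& (1 <<< cur) != 0 || pvBad state pre cur then dp
        else pvSet2 dp (state ||| (1 <<< cur)) cur
          (((dp.getD (state ||| (1 <<< cur)) []).getD cur 0) + ((dp.getD state []).getD pre 0)))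
      dp) dp) dp0
  (List.range 512).foldl (fun acc state =>
    if m ≤ (pvPop state : Int) ∧ (pvPop state : Int) ≤ n
    then acc + ((dp.getD state []).foldl (· + ·) 0) else acc) 0

-- ===== PORT B =====
-- `crosses` of B (same arithmetic, early-return on odd parity)
def pvCrosses (visited a b : Nat) : Bool :=
  let xa := a / 3
  let ya := a % 3
  let xb := b / 3
  let yb := b % 3
  if (xa + xb) % 2 != 0 || (ya + yb) % 2 != 0 then false
  else
    let mid := (xa + xb) / 2 * 3 + (ya + yb) / 2
    (visited >>> mid) &&& 1 == 0

-- `dfs` of B. `fuel` is only a structural-termination device: every recursive call marks a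
-- fresh one of the 9 cells, so with fuel = 9 at the root the fuel never reaches 0.
def pvDfs (fuel : Nat) (m n : Int) (cur visited depth : Nat) : Int :=
  match fuel with
  | 0 => 0
  | fuel + 1 =>
    let cnt : Int := if m ≤ (depth : Int) ∧ (depth : Int) ≤ n then 1 else 0
    (List.range 9).foldl (fun cnt nxt =>
      if (visited >>> nxt) &&& 1 == 1 || pvCrosses visited cur nxt then cnt
      else cnt + pvDfs fuel m n nxt (visited ||| (1 <<< nxt)) (depth + 1)) cnt

def numberOfPatterns_alt (m : Int) (n : Int) : Int :=
  (List.range 9).foldl (fun acc s => acc + pvDfs 9 m n s (1 <<< s) 1) 0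

-- ===== PRECONDITION & SPEC =====
def Spec_numberOfPatterns (m : Int) (n : Int) (out : Int) : Prop := out = numberOfPatterns_alt m n
instance (m : Int) (n : Int) (out : Int) : Decidable (Spec_numberOfPatterns m n out) := by
  unfold Spec_numberOfPatterns; infer_instance

-- ===== CLAIM (what is proved, stated in full; the proofs are below) =====
def Claim_equal_numberOfPatterns : Prop :=
  ∀ (m : Int) (n : Int), Dom_numberOfPatterns m n → Spec_numberOfPatterns m n (numberOfPatterns m n)

-- ===== LEMMAS AND PROOFS =====

-- ---------- shared validity predicate and the two counting functions ----------

-- a step from `p` to `c` is allowed when the visited set is `vis` (c not yet visited, no skipped midpoint)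
def pvValid (vis p c : Nat) : Bool := (vis &&& (1 <<< c) == 0) && !(pvBad vis p c)

theorem pv_xor_lt {S : Nat} {c : Nat} (h : S.testBit c = true) : S ^^^ (1 <<< c) < S := by
  have h1 : (1 : Nat) <<< c = 2 ^ c := by simp [Nat.shiftLeft_eq]
  rw [h1]
  refine Nat.lt_of_testBit c ?_ h ?_
  · simp [Nat.testBit_xor, h, Nat.testBit_two_pow_self]
  · intro j hj
    simp [Nat.testBit_xor, Nat.testBit_two_pow, hj.ne]

-- backward DP recurrence: pvF S c = number of valid sequences whose visited set is S and last cell is c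
def pvF (S c : Nat) : Int :=
  (if S = 1 <<< c then (1 : Int) else 0) +
  (if h : S.testBit c then
     ∑ p ∈ Finset.range 9,
       (if pvValid (S ^^^ (1 <<< c)) p c then pvF (S ^^^ (1 <<< c)) p else 0)
   else 0)
termination_by S
decreasing_by exact pv_xor_lt h

-- forward count: pvG vis cur j = number of valid extensions of length j from (cur, vis)
def pvG : Nat → Nat → Nat → Int
  | _, _, 0 => 1
  | vis, cur, j + 1 =>
      ∑ nxt ∈ Finset.range 9,
        (if pvValid vis cur nxt then pvG (vis ||| (1 <<< nxt)) nxt j else 0)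

def pvRow (S : Nat) : Int := ∑ c ∈ Finset.range 9, pvF S c
def pvW (k : Nat) : Int := ∑ S ∈ Finset.range 512, (if pvPop S = k then pvRow S else 0)

-- ---------- generic fold lemmas ----------

theorem foldl_ite_add_eq_sum (P : Nat → Prop) [DecidablePred P] (f : Nat → Int) (a : Int) (N : Nat) :
    (List.range N).foldl (fun acc s => if P s then acc + f s else acc) a
      = a + ∑ s ∈ Finset.range N, (if P s then f s else 0) := by
  induction N generalizing a with
  | zero => simp
  | succ N ih =>
      rw [List.range_succ, List.foldl_append]
      simp only [List.foldl_cons, List.foldl_nil]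
      rw [ih, Finset.sum_range_succ]
      split <;> ring

theorem foldl_add_eq_sum (f : Nat → Int) (a : Int) (N : Nat) :
    (List.range N).foldl (fun acc s => acc + f s) a = a + ∑ s ∈ Finset.range N, f s := by
  induction N generalizing a with
  | zero => simp
  | succ N ih =>
      rw [List.range_succ, List.foldl_append]
      simp only [List.foldl_cons, List.foldl_nil]
      rw [ih, Finset.sum_range_succ]; ring

theorem foldl_skip_add_eq_sum (P : Nat → Bool) (f : Nat → Int) (a : Int) (N : Nat) :
    (List.range N).foldl (fun acc s => if P s then acc else acc + f s) a
      = a + ∑ s ∈ Finset.range N, (if P s then 0 else f s) := by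
  induction N generalizing a with
  | zero => simp
  | succ N ih =>
      rw [List.range_succ, List.foldl_append]
      simp only [List.foldl_cons, List.foldl_nil]
      rw [ih, Finset.sum_range_succ]
      split <;> ring

-- ---------- bit lemmas ----------

theorem pv_one_shiftLeft (c : Nat) : (1 : Nat) <<< c = 2 ^ c := by simp [Nat.shiftLeft_eq]

theorem pv_and_one_eq_testBit (S i : Nat) : (S >>> i) &&& 1 = (S.testBit i).toNat := by
  rw [Nat.and_one_is_mod, Nat.testBit, Nat.shiftRight_eq_div_pow]
  rcases Nat.mod_two_eq_zero_or_one (S / 2 ^ i) with h | h <;>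
    simp [h, Nat.and_one_is_mod, Nat.shiftRight_eq_div_pow]

theorem pv_land_shift_eq_zero_iff (S c : Nat) : (S &&& (1 <<< c) = 0) ↔ S.testBit c = false := by
  rw [pv_one_shiftLeft, Nat.and_two_pow]
  rcases h : S.testBit c with _ | _ <;> simp [h] <;> positivity

-- more bit lemmas

theorem pv_valid_testBit {vis p c : Nat} (h : pvValid vis p c = true) : vis.testBit c = false := by
  have h1 := (Bool.and_eq_true ..).mp h |>.1
  exact (pv_land_shift_eq_zero_iff vis c).mp (by simpa using h1)

theorem pv_testBit_or_self (S c : Nat) : (S ||| (1 <<< c)).testBit c = true := by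
  simp [Nat.testBit_or, pv_one_shiftLeft, Nat.testBit_two_pow_self]

theorem pv_or_xor_cancel {S c : Nat} (h : S.testBit c = false) :
    (S ||| (1 <<< c)) ^^^ (1 <<< c) = S := by
  apply Nat.eq_of_testBit_eq
  intro i
  by_cases hic : i = c
  · subst hic; simp [Nat.testBit_xor, Nat.testBit_or, pv_one_shiftLeft, Nat.testBit_two_pow_self, h]
  · simp [Nat.testBit_xor, Nat.testBit_or, pv_one_shiftLeft, Nat.testBit_two_pow, Ne.symm hic]

theorem pv_xor_or_cancel {S c : Nat} (h : S.testBit c = true) :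
    (S ^^^ (1 <<< c)) ||| (1 <<< c) = S := by
  apply Nat.eq_of_testBit_eq
  intro i
  by_cases hic : i = c
  · subst hic; simp [Nat.testBit_xor, Nat.testBit_or, pv_one_shiftLeft, Nat.testBit_two_pow_self, h]
  · simp [Nat.testBit_xor, Nat.testBit_or, pv_one_shiftLeft, Nat.testBit_two_pow, Ne.symm hic]

theorem pv_testBit_xor_self {S c : Nat} : (S ^^^ (1 <<< c)).testBit c = (!S.testBit c) := by
  simp [Nat.testBit_xor, pv_one_shiftLeft, Nat.testBit_two_pow_self]

theorem pv_or_lt_512 {S c : Nat} (hS : S < 512) (hc : c < 9) : S ||| (1 <<< c) < 512 := by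
  have h1 : (1 : Nat) <<< c < 2 ^ 9 := by
    rw [pv_one_shiftLeft]
    exact Nat.pow_lt_pow_right (by norm_num) hc
  exact Nat.or_lt_two_pow (n := 9) hS h1

theorem pv_xor_lt_512 {S c : Nat} (hS : S < 512) (hc : c < 9) : S ^^^ (1 <<< c) < 512 := by
  have h1 : (1 : Nat) <<< c < 2 ^ 9 := by
    rw [pv_one_shiftLeft]
    exact Nat.pow_lt_pow_right (by norm_num) hc
  exact Nat.xor_lt_two_pow (n := 9) hS h1

theorem pv_beq_shift_one (v m : Nat) : ((v >>> m) &&& 1 == 1) = v.testBit m := by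
  rw [pv_and_one_eq_testBit]; cases h : v.testBit m <;> simp

theorem pv_beq_land_zero (v m : Nat) : (v &&& (1 <<< m) == 0) = !v.testBit m := by
  rcases h : v.testBit m with _ | _
  · simp [(pv_land_shift_eq_zero_iff v m).2 h]
  · have hne : ¬ (v &&& (1 <<< m) = 0) := fun hh => by
      rw [(pv_land_shift_eq_zero_iff v m).1 hh] at h; cases h
    simp [hne]

-- skip-condition bridges

theorem pv_skipA_eq (state pre cur : Nat) :
    (state &&& (1 <<< cur) != 0 || pvBad state pre cur) = !pvValid state pre cur := by
  simp [pvValid, Bool.not_and, Bool.not_not, bne]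

theorem pv_testBit_mod (v m : Nat) : v >>> m % 2 = (v.testBit m).toNat := by
  have h := pv_and_one_eq_testBit v m
  rwa [Nat.and_one_is_mod] at h

theorem pv_crosses_eq_bad (v a b : Nat) : pvCrosses v a b = pvBad v a b := by
  unfold pvCrosses pvBad
  simp only [Nat.and_one_is_mod]
  rcases Nat.mod_two_eq_zero_or_one (a / 3 + b / 3) with h1 | h1 <;>
    rcases Nat.mod_two_eq_zero_or_one (a % 3 + b % 3) with h2 | h2 <;>
      simp [h1, h2, pv_testBit_mod, pv_beq_land_zero] <;>
        cases v.testBit ((a / 3 + b / 3) / 2 * 3 + (a % 3 + b % 3) / 2) <;> simp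

theorem pv_skipB_eq (vis cur nxt : Nat) :
    ((vis >>> nxt) &&& 1 == 1 || pvCrosses vis cur nxt) = !pvValid vis cur nxt := by
  rw [pv_crosses_eq_bad, pv_beq_shift_one]
  unfold pvValid
  rw [pv_beq_land_zero]
  cases vis.testBit nxt <;> cases pvBad vis cur nxt <;> rfl

-- ---------- B side: pvDfs as a sum of pvG counts ----------

theorem pvDfs_eq_sum (fuel : Nat) (m n : Int) (cur vis depth : Nat) :
    pvDfs fuel m n cur vis depth
      = ∑ j ∈ Finset.range fuel,
          (if m ≤ ((depth + j : Nat) : Int) ∧ ((depth + j : Nat) : Int) ≤ n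
           then pvG vis cur j else 0) := by
  induction fuel generalizing cur vis depth with
  | zero => simp [pvDfs]
  | succ fuel ih =>
      simp only [pvDfs]
      rw [foldl_skip_add_eq_sum (fun nxt => ((vis >>> nxt) &&& 1 == 1 || pvCrosses vis cur nxt))
            (fun nxt => pvDfs fuel m n nxt (vis ||| (1 <<< nxt)) (depth + 1))]
      have hstep : ∀ nxt, (if ((vis >>> nxt) &&& 1 == 1 || pvCrosses vis cur nxt) then (0:Int)
              else pvDfs fuel m n nxt (vis ||| (1 <<< nxt)) (depth + 1))
            = ∑ j ∈ Finset.range fuel,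
                (if m ≤ ((depth + 1 + j : Nat) : Int) ∧ ((depth + 1 + j : Nat) : Int) ≤ n
                 then (if pvValid vis cur nxt then pvG (vis ||| (1 <<< nxt)) nxt j else 0) else 0) := by
        intro nxt
        rw [pv_skipB_eq]
        rcases h : pvValid vis cur nxt with _ | _
        · simp
        · simp [ih]
      simp only [hstep]
      rw [Finset.sum_comm]
      have hG : ∀ j, (∑ nxt ∈ Finset.range 9,
            (if m ≤ ((depth + 1 + j : Nat) : Int) ∧ ((depth + 1 + j : Nat) : Int) ≤ n
             then (if pvValid vis cur nxt then pvG (vis ||| (1 <<< nxt)) nxt j else 0) else 0))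
          = (if m ≤ ((depth + (j+1) : Nat) : Int) ∧ ((depth + (j+1) : Nat) : Int) ≤ n
             then pvG vis cur (j+1) else 0) := by
        intro j
        have harith : depth + 1 + j = depth + (j + 1) := by omega
        rw [harith]
        split
        · rfl
        · simp
      simp only [hG]
      rw [Finset.sum_range_succ']
      simp [pvG]
      ring

theorem pv_alt_eq (m n : Int) : numberOfPatterns_alt m n
    = ∑ j ∈ Finset.range 9,
        (if m ≤ ((1 + j : Nat) : Int) ∧ ((1 + j : Nat) : Int) ≤ n
         then ∑ s ∈ Finset.range 9, pvG (1 <<< s) s j else 0) := by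
  unfold numberOfPatterns_alt
  rw [foldl_add_eq_sum (fun s => pvDfs 9 m n s (1 <<< s) 1)]
  simp only [pvDfs_eq_sum, zero_add]
  rw [Finset.sum_comm]
  refine Finset.sum_congr rfl ?_
  intro j _
  split <;> simp

-- ---------- popcount lemmas ----------

theorem foldl_add_eq_sum_nat (f : Nat → Nat) (a : Nat) (N : Nat) :
    (List.range N).foldl (fun acc s => acc + f s) a = a + ∑ s ∈ Finset.range N, f s := by
  induction N generalizing a with
  | zero => simp
  | succ N ih =>
      rw [List.range_succ, List.foldl_append]
      simp only [List.foldl_cons, List.foldl_nil]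
      rw [ih, Finset.sum_range_succ]; omega

theorem pvPop_eq_sum (S : Nat) : pvPop S = ∑ i ∈ Finset.range 9, (S.testBit i).toNat := by
  unfold pvPop
  rw [foldl_add_eq_sum_nat (fun i => (S >>> i) &&& 1)]
  simp [pv_testBit_mod]

theorem pvPop_or {S c : Nat} (hc : c < 9) (h : S.testBit c = false) :
    pvPop (S ||| (1 <<< c)) = pvPop S + 1 := by
  rw [pvPop_eq_sum, pvPop_eq_sum]
  have hmem : c ∈ Finset.range 9 := Finset.mem_range.mpr hc
  rw [← Finset.add_sum_erase _ _ hmem, ← Finset.add_sum_erase _ _ hmem]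
  have hsame : ∀ i ∈ (Finset.range 9).erase c,
      ((S ||| (1 <<< c)).testBit i).toNat = (S.testBit i).toNat := by
    intro i hi
    have hne : i ≠ c := Finset.ne_of_mem_erase hi
    simp [Nat.testBit_or, pv_one_shiftLeft, Nat.testBit_two_pow, Ne.symm hne]
  rw [Finset.sum_congr rfl hsame, pv_testBit_or_self, h]
  simp; omega

theorem pvPop_xor {S c : Nat} (hc : c < 9) (h : S.testBit c = true) :
    pvPop S = pvPop (S ^^^ (1 <<< c)) + 1 := by
  have h1 : (S ^^^ (1 <<< c)).testBit c = false := by rw [pv_testBit_xor_self, h]; rfl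
  have h2 := pvPop_or hc h1
  rwa [pv_xor_or_cancel h] at h2

theorem pvPop_zero {S : Nat} (hS : S < 512) (h : pvPop S = 0) : S = 0 := by
  rw [pvPop_eq_sum] at h
  apply Nat.eq_of_testBit_eq
  intro i
  by_cases hi : i < 9
  · have := Finset.sum_eq_zero_iff.mp h i (Finset.mem_range.mpr hi)
    rcases hb : S.testBit i with _ | _
    · simp [Nat.zero_testBit]
    · rw [hb] at this; cases this
  · rw [Nat.testBit_lt_two_pow, Nat.zero_testBit]
    calc S < 512 := hS
    _ ≤ 2 ^ i := by
        have : (2:Nat) ^ 9 ≤ 2 ^ i := Nat.pow_le_pow_right (by norm_num) (by omega)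
        simpa using this

theorem pvPop_two_pow {c : Nat} (hc : c < 9) : pvPop (1 <<< c) = 1 := by
  have h := pvPop_or hc (Nat.zero_testBit c)
  rw [Nat.zero_or] at h
  rw [h]
  norm_num [pvPop]

-- ---------- the meet-in-the-middle invariant ----------

def pvU (i j : Nat) : Int :=
  ∑ S ∈ Finset.range 512, ∑ c ∈ Finset.range 9,
    (if pvPop S = i then pvF S c * pvG S c j else 0)

theorem pvU_zero_right (i : Nat) : pvU i 0 = pvW i := by
  unfold pvU pvW pvRow
  refine Finset.sum_congr rfl ?_
  intro S _
  rw [Finset.sum_ite_irrel, Finset.sum_const_zero]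
  simp [pvG]

theorem pvF_zero (c : Nat) : pvF 0 c = 0 := by
  rw [pvF]
  have h1 : (0 : Nat) ≠ 1 <<< c := by
    rw [pv_one_shiftLeft]; positivity
  simp [Nat.zero_testBit, h1]

theorem pvU_zero_left (j : Nat) : pvU 0 j = 0 := by
  unfold pvU
  refine Finset.sum_eq_zero ?_
  intro S hS
  refine Finset.sum_eq_zero ?_
  intro c _
  split
  · rename_i h
    rw [pvPop_zero (Finset.mem_range.mp hS) h, pvF_zero]
    ring
  · rfl

-- canonical triple-sum forms of the two sides of the exchange step
def pvLHS (i j : Nat) : Int :=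
  ∑ S ∈ Finset.range 512, ∑ c ∈ Finset.range 9, ∑ nxt ∈ Finset.range 9,
    (if pvPop S = i ∧ pvValid S c nxt = true
     then pvF S c * pvG (S ||| (1 <<< nxt)) nxt j else 0)

def pvRHS (i j : Nat) : Int :=
  ∑ T ∈ Finset.range 512, ∑ c ∈ Finset.range 9, ∑ nxt ∈ Finset.range 9,
    (if pvPop T = i + 1 ∧ T.testBit nxt = true ∧ pvValid (T ^^^ (1 <<< nxt)) c nxt = true
     then pvF (T ^^^ (1 <<< nxt)) c * pvG T nxt j else 0)

theorem pvU_succ_eq_LHS (i j : Nat) : pvU i (j + 1) = pvLHS i j := by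
  unfold pvU pvLHS
  refine Finset.sum_congr rfl ?_
  intro S _
  refine Finset.sum_congr rfl ?_
  intro c _
  by_cases hp : pvPop S = i
  · rw [if_pos hp, pvG, Finset.mul_sum]
    refine Finset.sum_congr rfl ?_
    intro nxt _
    by_cases hv : pvValid S c nxt = true
    · rw [if_pos hv, if_pos ⟨hp, hv⟩]
    · rw [if_neg hv, if_neg (fun hh => hv hh.2), mul_zero]
  · rw [if_neg hp]
    symm
    refine Finset.sum_eq_zero ?_
    intro nxt _
    rw [if_neg (fun hh => hp hh.1)]

theorem pvU_eq_RHS_add_boundary (i j : Nat) :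
    pvU (i + 1) j
      = pvRHS i j
        + ∑ T ∈ Finset.range 512, ∑ nxt ∈ Finset.range 9,
            (if pvPop T = i + 1 ∧ T = 1 <<< nxt then pvG T nxt j else 0) := by
  unfold pvU pvRHS
  rw [← Finset.sum_add_distrib]
  refine Finset.sum_congr rfl ?_
  intro T _
  rw [Finset.sum_comm (s := Finset.range 9) (t := Finset.range 9)
        (f := fun c nxt => (if pvPop T = i + 1 ∧ T.testBit nxt = true ∧
                  pvValid (T ^^^ (1 <<< nxt)) c nxt = true
               then pvF (T ^^^ (1 <<< nxt)) c * pvG T nxt j else 0))]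
  rw [← Finset.sum_add_distrib]
  refine Finset.sum_congr rfl ?_
  intro nxt _
  by_cases hp : pvPop T = i + 1
  · rw [if_pos hp, pvF, add_mul, add_comm]
    congr 1
    · by_cases hbit : T.testBit nxt = true
      · rw [dif_pos hbit, Finset.sum_mul]
        refine Finset.sum_congr rfl ?_
        intro c _
        rw [ite_mul, zero_mul]
        by_cases hv : pvValid (T ^^^ (1 <<< nxt)) c nxt = true
        · rw [if_pos hv, if_pos ⟨hp, hbit, hv⟩]
        · rw [if_neg hv, if_neg (fun hh => hv hh.2.2)]
      · rw [dif_neg hbit, zero_mul]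
        symm
        refine Finset.sum_eq_zero ?_
        intro c _
        rw [if_neg (fun hh => hbit hh.2.1)]
    · by_cases hb : T = 1 <<< nxt
      · rw [if_pos hb, if_pos ⟨hp, hb⟩, one_mul]
      · rw [if_neg hb, if_neg (fun hh => hb hh.2), zero_mul]
  · rw [if_neg hp, if_neg (fun hh => hp hh.1), add_zero]
    symm
    refine Finset.sum_eq_zero ?_
    intro c _
    rw [if_neg (fun hh => hp hh.1)]

theorem pvBoundary_eq (i j : Nat) :
    (∑ T ∈ Finset.range 512, ∑ nxt ∈ Finset.range 9,
        (if pvPop T = i + 1 ∧ T = 1 <<< nxt then pvG T nxt j else 0))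
      = (if i = 0 then ∑ s ∈ Finset.range 9, pvG (1 <<< s) s j else 0) := by
  rw [Finset.sum_comm]
  have hpt : ∀ nxt ∈ Finset.range 9,
      (∑ T ∈ Finset.range 512, (if pvPop T = i + 1 ∧ T = 1 <<< nxt then pvG T nxt j else 0))
        = (if i = 0 then pvG (1 <<< nxt) nxt j else 0) := by
    intro nxt hn
    have hmem : (1 <<< nxt) ∈ Finset.range 512 := by
      rw [Finset.mem_range, pv_one_shiftLeft]
      calc (2:Nat) ^ nxt < 2 ^ 9 := Nat.pow_lt_pow_right (by norm_num) (Finset.mem_range.mp hn)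
      _ = 512 := by norm_num
    rw [Finset.sum_eq_single_of_mem (1 <<< nxt) hmem
          (fun T _ hne => if_neg (fun hh => hne hh.2))]
    have hpc : pvPop (1 <<< nxt) = 1 := pvPop_two_pow (Finset.mem_range.mp hn)
    by_cases hi : i = 0
    · rw [if_pos hi, if_pos ⟨by omega, rfl⟩]
    · rw [if_neg hi, if_neg (fun hh => hi (by have h1 := hh.1; rw [hpc] at h1; omega))]
  calc (∑ nxt ∈ Finset.range 9, ∑ T ∈ Finset.range 512,
          (if pvPop T = i + 1 ∧ T = 1 <<< nxt then pvG T nxt j else 0))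
      = ∑ nxt ∈ Finset.range 9, (if i = 0 then pvG (1 <<< nxt) nxt j else 0) :=
        Finset.sum_congr rfl hpt
    _ = (if i = 0 then ∑ s ∈ Finset.range 9, pvG (1 <<< s) s j else 0) := by split <;> simp

theorem pvLHS_eq_RHS (i j : Nat) : pvLHS i j = pvRHS i j := by
  have hL : pvLHS i j
      = ∑ p ∈ (Finset.range 512 ×ˢ (Finset.range 9 ×ˢ Finset.range 9)).filter
          (fun p => pvPop p.1 = i ∧ pvValid p.1 p.2.1 p.2.2 = true),
          pvF p.1 p.2.1 * pvG (p.1 ||| (1 <<< p.2.2)) p.2.2 j := by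
    rw [Finset.sum_filter, Finset.sum_product]
    unfold pvLHS
    refine Finset.sum_congr rfl fun S _ => ?_
    rw [Finset.sum_product]
  have hR : pvRHS i j
      = ∑ q ∈ (Finset.range 512 ×ˢ (Finset.range 9 ×ˢ Finset.range 9)).filter
          (fun q => pvPop q.1 = i + 1 ∧ q.1.testBit q.2.2 = true ∧
                    pvValid (q.1 ^^^ (1 <<< q.2.2)) q.2.1 q.2.2 = true),
          pvF (q.1 ^^^ (1 <<< q.2.2)) q.2.1 * pvG q.1 q.2.2 j := by
    rw [Finset.sum_filter, Finset.sum_product]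
    unfold pvRHS
    refine Finset.sum_congr rfl fun T _ => ?_
    rw [Finset.sum_product]
  rw [hL, hR]
  refine Finset.sum_bij' (i := fun p _ => (p.1 ||| (1 <<< p.2.2), p.2.1, p.2.2))
    (j := fun q _ => (q.1 ^^^ (1 <<< q.2.2), q.2.1, q.2.2)) ?_ ?_ ?_ ?_ ?_
  -- hi : image of each left triple is in the right support
  · rintro ⟨S, c, nxt⟩ hp
    rw [Finset.mem_filter, Finset.mem_product, Finset.mem_product] at hp
    obtain ⟨⟨hS, hc, hn⟩, hpc, hv⟩ := hp
    dsimp only at hS hc hn hpc hv ⊢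
    rw [Finset.mem_range] at hS hc hn
    have hbit : S.testBit nxt = false := pv_valid_testBit hv
    rw [Finset.mem_filter, Finset.mem_product, Finset.mem_product]
    refine ⟨⟨?_, ?_, ?_⟩, ?_, ?_, ?_⟩
    · exact Finset.mem_range.mpr (pv_or_lt_512 hS hn)
    · exact Finset.mem_range.mpr hc
    · exact Finset.mem_range.mpr hn
    · show pvPop (S ||| (1 <<< nxt)) = i + 1
      rw [pvPop_or hn hbit, hpc]
    · exact pv_testBit_or_self S nxt
    · show pvValid ((S ||| (1 <<< nxt)) ^^^ (1 <<< nxt)) c nxt = true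
      rw [pv_or_xor_cancel hbit]; exact hv
  -- hj : image of each right triple is in the left support
  · rintro ⟨T, c, nxt⟩ hq
    rw [Finset.mem_filter, Finset.mem_product, Finset.mem_product] at hq
    obtain ⟨⟨hT, hc, hn⟩, hpc, hbit, hv⟩ := hq
    dsimp only at hT hc hn hpc hbit hv ⊢
    rw [Finset.mem_range] at hT hc hn
    rw [Finset.mem_filter, Finset.mem_product, Finset.mem_product]
    refine ⟨⟨?_, ?_, ?_⟩, ?_, ?_⟩
    · exact Finset.mem_range.mpr (pv_xor_lt_512 hT hn)
    · exact Finset.mem_range.mpr hc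
    · exact Finset.mem_range.mpr hn
    · show pvPop (T ^^^ (1 <<< nxt)) = i
      have h2 := pvPop_xor hn hbit
      omega
    · exact hv
  -- left inverse
  · rintro ⟨S, c, nxt⟩ hp
    rw [Finset.mem_filter, Finset.mem_product, Finset.mem_product] at hp
    obtain ⟨_, _, hv⟩ := hp
    dsimp only at hv ⊢
    have hbit : S.testBit nxt = false := pv_valid_testBit hv
    simp [pv_or_xor_cancel hbit]
  -- right inverse
  · rintro ⟨T, c, nxt⟩ hq
    rw [Finset.mem_filter, Finset.mem_product, Finset.mem_product] at hq
    obtain ⟨_, _, hbit, _⟩ := hq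
    dsimp only at hbit ⊢
    simp [pv_xor_or_cancel hbit]
  -- values agree
  · rintro ⟨S, c, nxt⟩ hp
    rw [Finset.mem_filter, Finset.mem_product, Finset.mem_product] at hp
    obtain ⟨_, _, hv⟩ := hp
    dsimp only at hv ⊢
    have hbit : S.testBit nxt = false := pv_valid_testBit hv
    show pvF S c * pvG (S ||| (1 <<< nxt)) nxt j
        = pvF ((S ||| (1 <<< nxt)) ^^^ (1 <<< nxt)) c * pvG (S ||| (1 <<< nxt)) nxt j
    rw [pv_or_xor_cancel hbit]

theorem pvU_step (i j : Nat) :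
    pvU i (j + 1) + (if i = 0 then ∑ s ∈ Finset.range 9, pvG (1 <<< s) s j else 0)
      = pvU (i + 1) j := by
  rw [pvU_succ_eq_LHS, pvU_eq_RHS_add_boundary, pvBoundary_eq, pvLHS_eq_RHS]

theorem pvU_chain (j : Nat) : ∀ i, 1 ≤ i → pvU i j = pvU (i + j) 0 := by
  induction j with
  | zero => intro i _; norm_num
  | succ j ih =>
      intro i hi
      have h := pvU_step i j
      rw [if_neg (by omega)] at h
      rw [add_zero] at h
      rw [h, ih (i + 1) (by omega)]
      have he : i + 1 + j = i + (j + 1) := by omega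
      rw [he]

theorem pv_meet (j : Nat) : (∑ s ∈ Finset.range 9, pvG (1 <<< s) s j) = pvW (j + 1) := by
  have h := pvU_step 0 j
  rw [if_pos rfl, pvU_zero_left, zero_add] at h
  rw [h, pvU_chain j 1 (le_refl 1), pvU_zero_right]
  have he : 1 + j = j + 1 := by omega
  rw [he]


-- ---------- A side: the list-of-lists DP fold computes the recurrence pvF ----------

def pvTab (g : Nat → Nat → Int) : List (List Int) :=
  (List.range 512).map fun S => (List.range 9).map fun c => g S c

def pvUpd (g : Nat → Nat → Int) (S c : Nat) (v : Int) : Nat → Nat → Int :=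
  fun S' c' => if S' = S ∧ c' = c then v else g S' c'

-- the table contents after the states < K have been processed
def pvGC (K S c : Nat) : Int :=
  (if S = 1 <<< c then (1 : Int) else 0) +
  ∑ T ∈ Finset.range K, ∑ p ∈ Finset.range 9,
    (if T ||| (1 <<< c) = S ∧ pvValid T p c = true then pvF T p else 0)

theorem pv_getD_map_range {α : Type} (n k : Nat) (f : Nat → α) (d : α) (hk : k < n) :
    ((List.range n).map f).getD k d = f k := by
  rw [List.getD_eq_getElem?_getD, List.getElem?_map, List.getElem?_range hk]
  rfl

theorem pv_tab_getD {g : Nat → Nat → Int} {S : Nat} (hS : S < 512) :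
    (pvTab g).getD S [] = (List.range 9).map (g S) := by
  unfold pvTab
  exact pv_getD_map_range 512 S _ [] hS

theorem pv_row_getD {g : Nat → Nat → Int} {S c : Nat} (hc : c < 9) :
    ((List.range 9).map (g S)).getD c 0 = g S c :=
  pv_getD_map_range 9 c _ 0 hc

theorem pv_map_range_set {α : Type} (n k : Nat) (f : Nat → α) (x : α) (hk : k < n) :
    ((List.range n).map f).set k x = (List.range n).map fun j => if j = k then x else f j := by
  apply List.ext_getElem
  · simp
  · intro i h1 h2
    simp only [List.length_set, List.length_map, List.length_range] at h1 h2
    rw [List.getElem_set, List.getElem_map, List.getElem_range]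
    rw [List.getElem_map, List.getElem_range]
    by_cases hik : k = i
    · subst hik; simp
    · simp [hik, Ne.symm hik]

theorem pv_set_tab {g : Nat → Nat → Int} {S c : Nat} (v : Int) (hS : S < 512) (hc : c < 9) :
    pvSet2 (pvTab g) S c v = pvTab (pvUpd g S c v) := by
  unfold pvSet2
  rw [pv_tab_getD hS, pv_map_range_set 9 c _ v hc]
  unfold pvTab
  rw [pv_map_range_set 512 S _ _ hS]
  refine List.map_congr_left ?_
  intro S' hS'
  by_cases h1 : S' = S
  · subst h1
    simp only [if_pos rfl]
    refine List.map_congr_left ?_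
    intro c' _
    unfold pvUpd
    by_cases h2 : c' = c
    · subst h2; simp
    · simp [h2]
  · simp only [if_neg h1]
    refine List.map_congr_left ?_
    intro c' _
    unfold pvUpd
    simp [h1]

theorem pv_tab_congr {g g' : Nat → Nat → Int}
    (h : ∀ S, S < 512 → ∀ c, c < 9 → g S c = g' S c) : pvTab g = pvTab g' := by
  unfold pvTab
  refine List.map_congr_left ?_
  intro S hS
  refine List.map_congr_left ?_
  intro c hc
  exact h S (List.mem_range.mp hS) c (List.mem_range.mp hc)

-- the initial table
theorem pv_init_tab :
    (List.range 9).foldl (fun dp i => pvSet2 dp (1 <<< i) i 1)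
        (List.replicate 512 (List.replicate 9 (0 : Int)))
      = pvTab (fun S c => if S = 1 <<< c ∧ c < 9 then 1 else 0) := by
  have hbase : (List.replicate 512 (List.replicate 9 (0 : Int)))
      = pvTab (fun _ _ => 0) := by
    symm
    unfold pvTab
    rw [List.eq_replicate_iff]
    constructor
    · simp
    · intro l hl
      rw [List.mem_map] at hl
      obtain ⟨S, _, hS⟩ := hl
      rw [← hS, List.eq_replicate_iff]
      simp
  rw [hbase]
  have main : ∀ i, i ≤ 9 →
      (List.range i).foldl (fun dp k => pvSet2 dp (1 <<< k) k 1) (pvTab (fun _ _ => 0))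
        = pvTab (fun S c => if S = 1 <<< c ∧ c < i then 1 else 0) := by
    intro i hi
    induction i with
    | zero =>
        simp only [List.range_zero, List.foldl_nil]
        refine pv_tab_congr ?_
        intro S _ c _
        simp
    | succ i ih =>
        rw [List.range_succ, List.foldl_append]
        simp only [List.foldl_cons, List.foldl_nil]
        rw [ih (by omega)]
        have hS : (1 <<< i) < 512 := by
          rw [pv_one_shiftLeft]
          calc (2:Nat) ^ i < 2 ^ 9 := Nat.pow_lt_pow_right (by norm_num) (by omega)
          _ = 512 := by norm_num
        rw [pv_set_tab 1 hS (by omega)]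
        refine pv_tab_congr ?_
        intro S _ c _
        unfold pvUpd
        dsimp only
        by_cases h1 : S = 1 <<< i ∧ c = i
        · rw [if_pos h1, if_pos ⟨by rw [h1.2]; exact h1.1, by rw [h1.2]; exact Nat.lt_succ_self i⟩]
        · rw [if_neg h1]
          by_cases h2 : S = 1 <<< c ∧ c < i
          · rw [if_pos h2, if_pos ⟨h2.1, by omega⟩]
          · rw [if_neg h2, if_neg fun hh => ?_]
            rcases Nat.lt_or_ge c i with hlt | hge
            · exact h2 ⟨hh.1, hlt⟩
            · have hci : c = i := by omega
              exact h1 ⟨by rw [← hci]; exact hh.1, hci⟩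
  exact main 9 (le_refl 9)


-- rows are final once their state has been processed
theorem pvGC_eval (K S c : Nat) (hSK : S ≤ K) : pvGC K S c = pvF S c := by
  unfold pvGC
  rw [pvF]
  congr 1
  by_cases hbit : S.testBit c = true
  · have hT0 : S ^^^ (1 <<< c) < K := lt_of_lt_of_le (pv_xor_lt hbit) hSK
    rw [Finset.sum_eq_single_of_mem (S ^^^ (1 <<< c)) (Finset.mem_range.mpr hT0) ?other]
    case other =>
      intro T _ hTne
      refine Finset.sum_eq_zero ?_
      intro p _
      rw [if_neg ?_]
      rintro ⟨hor, hv⟩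
      have hbT : T.testBit c = false := pv_valid_testBit hv
      exact hTne (by rw [← hor, pv_or_xor_cancel hbT])
    rw [dif_pos hbit]
    refine Finset.sum_congr rfl ?_
    intro p _
    have hcond : (S ^^^ (1 <<< c)) ||| (1 <<< c) = S := pv_xor_or_cancel hbit
    by_cases hv : pvValid (S ^^^ (1 <<< c)) p c = true
    · rw [if_pos ⟨hcond, hv⟩, if_pos hv]
    · rw [if_neg (fun hh => hv hh.2), if_neg hv]
  · rw [dif_neg hbit]
    refine Finset.sum_eq_zero ?_
    intro T _
    refine Finset.sum_eq_zero ?_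
    intro p _
    rw [if_neg ?_]
    rintro ⟨hor, _⟩
    exact hbit (by rw [← hor]; exact pv_testBit_or_self T c)

-- contribution of one processed (pre, cur) pair of state K to cell (S, c)
def pvPush (K : Nat) (pc : Nat × Nat) (S c : Nat) : Int :=
  if K ||| (1 <<< pc.2) = S ∧ pc.2 = c ∧ pvValid K pc.1 pc.2 = true then pvF K pc.1 else 0

def pvPushL : List (Nat × Nat) → Nat → Nat → Nat → Int
  | [], _, _, _ => 0
  | pc :: L, K, S, c => pvPush K pc S c + pvPushL L K S c

theorem pvPushL_cons (pc : Nat × Nat) (L : List (Nat × Nat)) (K S c : Nat) :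
    pvPushL (pc :: L) K S c = pvPush K pc S c + pvPushL L K S c := rfl

theorem pv_list_sum_range (f : Nat → Int) (n : Nat) :
    ((List.range n).map f).sum = ∑ i ∈ Finset.range n, f i := by
  induction n with
  | zero => simp
  | succ n ih => rw [List.range_succ, List.map_append, List.sum_append, Finset.sum_range_succ, ih]; simp

theorem pv_foldl_nested {α β γ : Type} (l1 : List α) (l2 : List β) (f : γ → α → β → γ) (a : γ) :
    l1.foldl (fun acc x => l2.foldl (fun acc y => f acc x y) acc) a
      = (l1.flatMap fun x => l2.map fun y => (x, y)).foldl (fun acc pc => f acc pc.1 pc.2) a := by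
  induction l1 generalizing a with
  | nil => rfl
  | cons x l1 ih =>
      simp only [List.flatMap_cons, List.foldl_append, List.foldl_cons, List.foldl_map]
      rw [← ih]

-- the batch effect of processing state K over a list of (pre, cur) pairs
theorem pv_batch (K : Nat) (hK : K < 512) :
    ∀ (L : List (Nat × Nat)), (∀ pc ∈ L, pc.1 < 9 ∧ pc.2 < 9) →
    ∀ (g : Nat → Nat → Int), (∀ p, g K p = pvF K p) →
      L.foldl (fun dp pc =>
          if K &&& (1 <<< pc.2) != 0 || pvBad K pc.1 pc.2 then dp
          else pvSet2 dp (K ||| (1 <<< pc.2)) pc.2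
            (((dp.getD (K ||| (1 <<< pc.2)) []).getD pc.2 0) + ((dp.getD K []).getD pc.1 0)))
        (pvTab g)
      = pvTab (fun S c => g S c + pvPushL L K S c) := by
  intro L
  induction L with
  | nil =>
      intro _ g _
      simp only [List.foldl_nil]
      exact pv_tab_congr (fun S _ c _ => by simp [pvPushL])
  | cons pc L ih =>
      intro hmem g hg
      obtain ⟨h1, h2⟩ := hmem pc List.mem_cons_self
      simp only [List.foldl_cons]
      have hvalid_eq := pv_skipA_eq K pc.1 pc.2
      by_cases hskip : (K &&& (1 <<< pc.2) != 0 || pvBad K pc.1 pc.2) = true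
      · rw [if_pos hskip]
        have hv : pvValid K pc.1 pc.2 = false := by
          rw [hvalid_eq] at hskip
          rcases h : pvValid K pc.1 pc.2 with _ | _
          · rfl
          · rw [h] at hskip; cases hskip
        rw [ih (fun q hq => hmem q (List.mem_cons_of_mem pc hq)) g hg]
        refine pv_tab_congr (fun S _ c _ => ?_)
        have hpush : pvPush K pc S c = 0 := by
          unfold pvPush
          rw [if_neg (fun hh => by rw [hv] at hh; exact Bool.false_ne_true hh.2.2)]
        simp [pvPushL, hpush]
      · rw [if_neg hskip]
        have hv : pvValid K pc.1 pc.2 = true := by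
          rw [hvalid_eq] at hskip
          rcases h : pvValid K pc.1 pc.2 with _ | _
          · rw [h] at hskip; simp at hskip
          · rfl
        have hbitK : K.testBit pc.2 = false := pv_valid_testBit hv
        have ht512 : K ||| (1 <<< pc.2) < 512 := pv_or_lt_512 hK h2
        have htK : K ||| (1 <<< pc.2) ≠ K := by
          intro hh
          have := pv_testBit_or_self K pc.2
          rw [hh, hbitK] at this
          cases this
        rw [pv_tab_getD ht512, pv_tab_getD (show K < 512 from hK),
            pv_row_getD h2, pv_row_getD h1,
            pv_set_tab _ ht512 h2]
        rw [ih (fun q hq => hmem q (List.mem_cons_of_mem pc hq))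
              (pvUpd g (K ||| (1 <<< pc.2)) pc.2 (g (K ||| (1 <<< pc.2)) pc.2 + g K pc.1))
              (fun p => by
                unfold pvUpd
                rw [if_neg (fun hh => htK hh.1.symm)]
                exact hg p)]
        refine pv_tab_congr (fun S _ c _ => ?_)
        rw [pvPushL_cons]
        unfold pvUpd pvPush
        by_cases hc : S = K ||| (1 <<< pc.2) ∧ c = pc.2
        · rw [if_pos hc, if_pos ⟨hc.1.symm, hc.2.symm, hv⟩, hc.1, hc.2, hg pc.1]
          ring
        · rw [if_neg hc, if_neg (fun hh => hc ⟨hh.1.symm, hh.2.1.symm⟩)]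
          ring


theorem pv_pushL_eq_sum (L : List (Nat × Nat)) (K S c : Nat) :
    pvPushL L K S c = (L.map fun pc => pvPush K pc S c).sum := by
  induction L with
  | nil => rfl
  | cons pc L ih => rw [pvPushL_cons, List.map_cons, List.sum_cons, ih]

theorem pv_sum_flatMap (l : List Nat) (h : Nat → List Int) :
    (l.flatMap h).sum = (l.map fun x => (h x).sum).sum := by
  induction l with
  | nil => rfl
  | cons x l ih => simp [List.flatMap_cons, List.sum_append, ih]

theorem pv_pushL_pairs (K S c : Nat) (hc : c < 9) :
    pvPushL ((List.range 9).flatMap fun p => (List.range 9).map fun q => (p, q)) K S c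
      = ∑ p ∈ Finset.range 9,
          (if K ||| (1 <<< c) = S ∧ pvValid K p c = true then pvF K p else 0) := by
  rw [pv_pushL_eq_sum, List.map_flatMap]
  rw [pv_sum_flatMap]
  have hmm : ∀ p, (((List.range 9).map fun q => (p, q)).map fun pc => pvPush K pc S c).sum
      = (if K ||| (1 <<< c) = S ∧ pvValid K p c = true then pvF K p else 0) := by
    intro p
    rw [List.map_map]
    have : ((fun pc => pvPush K pc S c) ∘ fun q => (p, q)) = fun q => pvPush K (p, q) S c := rfl
    rw [this, pv_list_sum_range (fun q => pvPush K (p, q) S c) 9]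
    unfold pvPush
    rw [Finset.sum_eq_single_of_mem c (Finset.mem_range.mpr hc)
          (fun q _ hq => if_neg (fun hh => hq hh.2.1))]
    by_cases hcc : K ||| (1 <<< c) = S ∧ pvValid K p c = true
    · rw [if_pos ⟨hcc.1, rfl, hcc.2⟩, if_pos hcc]
    · rw [if_neg (fun hh => hcc ⟨hh.1, hh.2.2⟩), if_neg hcc]
  simp only [hmm]
  rw [pv_list_sum_range (fun p => if K ||| (1 <<< c) = S ∧ pvValid K p c = true then pvF K p else 0) 9]

theorem pv_main_tab :
    (List.range 512).foldl (fun dp state =>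
      (List.range 9).foldl (fun dp pre =>
        (List.range 9).foldl (fun dp cur =>
          if state &&& (1 <<< cur) != 0 || pvBad state pre cur then dp
          else pvSet2 dp (state ||| (1 <<< cur)) cur
            (((dp.getD (state ||| (1 <<< cur)) []).getD cur 0) + ((dp.getD state []).getD pre 0)))
        dp) dp)
      (pvTab (fun S c => if S = 1 <<< c ∧ c < 9 then 1 else 0))
    = pvTab (pvGC 512) := by
  have main : ∀ K, K ≤ 512 →
      (List.range K).foldl (fun dp state =>
        (List.range 9).foldl (fun dp pre =>
          (List.range 9).foldl (fun dp cur =>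
            if state &&& (1 <<< cur) != 0 || pvBad state pre cur then dp
            else pvSet2 dp (state ||| (1 <<< cur)) cur
              (((dp.getD (state ||| (1 <<< cur)) []).getD cur 0) + ((dp.getD state []).getD pre 0)))
          dp) dp)
        (pvTab (fun S c => if S = 1 <<< c ∧ c < 9 then 1 else 0))
      = pvTab (pvGC K) := by
    intro K hK
    induction K with
    | zero =>
        simp only [List.range_zero, List.foldl_nil]
        refine pv_tab_congr (fun S _ c hc => ?_)
        unfold pvGC
        simp only [Finset.range_zero, Finset.sum_empty, add_zero]
        by_cases h1 : S = 1 <<< c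
        · rw [if_pos ⟨h1, hc⟩, if_pos h1]
        · rw [if_neg (fun hh => h1 hh.1), if_neg h1]
    | succ K ih =>
        rw [show List.range (K + 1) = List.range K ++ [K] from List.range_succ,
            List.foldl_append]
        simp only [List.foldl_cons, List.foldl_nil]
        rw [ih (by omega)]
        rw [pv_foldl_nested (List.range 9) (List.range 9)
              (fun dp pre cur =>
                if K &&& (1 <<< cur) != 0 || pvBad K pre cur then dp
                else pvSet2 dp (K ||| (1 <<< cur)) cur
                  (((dp.getD (K ||| (1 <<< cur)) []).getD cur 0) + ((dp.getD K []).getD pre 0)))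
              (pvTab (pvGC K))]
        rw [pv_batch K (by omega) _
              (fun pc hpc => by
                rw [List.mem_flatMap] at hpc
                obtain ⟨p, hp, hpc⟩ := hpc
                rw [List.mem_map] at hpc
                obtain ⟨q, hq, hrfl⟩ := hpc
                rw [← hrfl]
                exact ⟨List.mem_range.mp hp, List.mem_range.mp hq⟩)
              (pvGC K) (fun p => pvGC_eval K K p (le_refl K))]
        refine pv_tab_congr (fun S _ c hc => ?_)
        rw [pv_pushL_pairs K S c hc]
        unfold pvGC
        rw [Finset.sum_range_succ
              (fun T => ∑ p ∈ Finset.range 9,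
                (if T ||| (1 <<< c) = S ∧ pvValid T p c = true then pvF T p else 0)) K]
        ring
  exact main 512 (le_refl 512)

theorem pvPop_le9 (S : Nat) : pvPop S ≤ 9 := by
  rw [pvPop_eq_sum]
  calc ∑ i ∈ Finset.range 9, (S.testBit i).toNat
      ≤ ∑ _i ∈ Finset.range 9, 1 := Finset.sum_le_sum (fun i _ => Bool.toNat_le (S.testBit i))
  _ = 9 := by simp

theorem pvW_zero : pvW 0 = 0 := by
  unfold pvW
  refine Finset.sum_eq_zero (fun S hS => ?_)
  split
  · rename_i h
    rw [pvPop_zero (Finset.mem_range.mp hS) h]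
    unfold pvRow
    exact Finset.sum_eq_zero (fun c _ => pvF_zero c)
  · rfl

theorem pv_group (m n : Int) :
    (∑ S ∈ Finset.range 512, (if m ≤ (pvPop S : Int) ∧ (pvPop S : Int) ≤ n then pvRow S else 0))
      = ∑ k ∈ Finset.range 10, (if m ≤ (k : Int) ∧ (k : Int) ≤ n then pvW k else 0) := by
  have hR : ∀ k : Nat, (if m ≤ (k : Int) ∧ (k : Int) ≤ n then pvW k else 0)
      = ∑ S ∈ Finset.range 512,
          (if pvPop S = k ∧ (m ≤ (k : Int) ∧ (k : Int) ≤ n) then pvRow S else 0) := by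
    intro k
    unfold pvW
    by_cases hcnd : m ≤ (k : Int) ∧ (k : Int) ≤ n
    · rw [if_pos hcnd]
      refine Finset.sum_congr rfl (fun S _ => ?_)
      by_cases hp : pvPop S = k
      · rw [if_pos hp, if_pos ⟨hp, hcnd⟩]
      · rw [if_neg hp, if_neg (fun hh => hp hh.1)]
    · rw [if_neg hcnd]
      symm
      exact Finset.sum_eq_zero (fun S _ => if_neg (fun hh => hcnd hh.2))
  simp only [hR]
  rw [Finset.sum_comm]
  refine Finset.sum_congr rfl (fun S _ => ?_)
  rw [Finset.sum_eq_single_of_mem (pvPop S)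
        (Finset.mem_range.mpr (by have := pvPop_le9 S; omega))
        (fun k _ hk => if_neg (fun hh => hk hh.1.symm))]
  by_cases hc2 : m ≤ (pvPop S : Int) ∧ (pvPop S : Int) ≤ n
  · rw [if_pos hc2, if_pos ⟨rfl, hc2⟩]
  · rw [if_neg hc2, if_neg (fun hh => hc2 hh.2)]

theorem pvA_eq (m n : Int) :
    numberOfPatterns m n
      = ∑ k ∈ Finset.range 10, (if m ≤ (k : Int) ∧ (k : Int) ≤ n then pvW k else 0) := by
  dsimp only [numberOfPatterns]
  rw [pv_init_tab, pv_main_tab]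
  rw [foldl_ite_add_eq_sum (fun state => m ≤ (pvPop state : Int) ∧ (pvPop state : Int) ≤ n)
        (fun state => ((pvTab (pvGC 512)).getD state []).foldl (· + ·) 0) 0 512, zero_add]
  rw [← pv_group m n]
  refine Finset.sum_congr rfl (fun S hS => ?_)
  have hS512 := Finset.mem_range.mp hS
  have hrow : ((pvTab (pvGC 512)).getD S []).foldl (· + ·) 0 = pvRow S := by
    rw [pv_tab_getD hS512, List.foldl_map,
        foldl_add_eq_sum (fun c => pvGC 512 S c) 0 9, zero_add]
    unfold pvRow
    exact Finset.sum_congr rfl (fun c _ => pvGC_eval 512 S c (by omega))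
  rw [hrow]

-- ===== VERDICT (by name: the statement is the Claim_ definition above) =====
theorem numberOfPatterns_spec : Claim_equal_numberOfPatterns := by
  intro m n _
  unfold Spec_numberOfPatterns
  rw [pvA_eq m n, pv_alt_eq m n]
  rw [show (10:Nat) = 9 + 1 from rfl]
  rw [Finset.sum_range_succ' (fun k => if m ≤ (k:Int) ∧ (k:Int) ≤ n then pvW k else 0) 9]
  have hf0 : (if m ≤ ((0:Nat):Int) ∧ ((0:Nat):Int) ≤ n then pvW 0 else 0) = 0 := by
    rw [pvW_zero]; split <;> rfl
  rw [hf0, add_zero]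
  refine Finset.sum_congr rfl (fun j _ => ?_)
  rw [pv_meet j]
  rw [show 1 + j = j + 1 from Nat.add_comm 1 j]
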